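-- pv_equiv track=rewrite | github.com/clover3/Chair | src/arg/counter_arg_retrieval/build_dataset/run1/find_near_duplicate.py | get_tokens_overlap
-- ===== SOURCE A (Python) =====
-- from collections import Counter
--
-- def get_tokens_overlap(tokens1, tokens2):
--     tf1 = Counter(tokens1)
--     tf2 = Counter(tokens2)
--     tf_sum1 = sum(tf1.values())
--     tf_sum2 = sum(tf2.values())
--     min_tf_sum = min(tf_sum1, tf_sum2)
--     overlap_tf = 0
--     for key in tf1:
--         overlap_tf += min(tf1[key], tf2[key])
--     return overlap_tf, min_tf_sum
-- ===== SOURCE B (Python) =====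
-- def get_tokens_overlap(tokens1, tokens2):
--     s1 = sorted(tokens1)
--     s2 = sorted(tokens2)
--     n1, n2 = len(s1), len(s2)
--     i = j = overlap_tf = 0
--     while i < n1 and j < n2:
--         if s1[i] == s2[j]:
--             overlap_tf += 1
--             i += 1
--             j += 1
--         elif s1[i] < s2[j]:
--             i += 1
--         else:
--             j += 1
--     return overlap_tf, min(n1, n2)
-- ===== Notes on version B (the rewrite author's own statement) =====
-- stated objective: alternative
-- what changed: Replaces the two Counter hash tables and the per-key min scan by sorting both token lists and counting the multiset overlap with a two-pointer merge; min_tf_sum is computed directly as min of the lengths.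
import Mathlib
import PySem

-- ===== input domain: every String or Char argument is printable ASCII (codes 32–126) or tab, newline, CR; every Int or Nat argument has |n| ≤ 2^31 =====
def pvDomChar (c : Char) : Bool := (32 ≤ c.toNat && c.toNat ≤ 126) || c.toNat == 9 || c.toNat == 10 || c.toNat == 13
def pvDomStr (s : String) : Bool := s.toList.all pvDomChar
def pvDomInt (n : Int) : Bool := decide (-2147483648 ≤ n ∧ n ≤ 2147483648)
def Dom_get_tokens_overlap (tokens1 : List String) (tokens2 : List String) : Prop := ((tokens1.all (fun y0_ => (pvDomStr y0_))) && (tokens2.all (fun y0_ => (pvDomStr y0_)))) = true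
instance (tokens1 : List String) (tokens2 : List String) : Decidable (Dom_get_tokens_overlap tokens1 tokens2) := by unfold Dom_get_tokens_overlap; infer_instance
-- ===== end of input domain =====

-- B replaces the two Counters and the per-key min scan by a two-pointer merge of the
-- sorted token lists (alternative algorithm of similar cost); min_tf_sum is min of the lengths.

-- ===== PORT A =====
def get_tokens_overlap (tokens1 : List String) (tokens2 : List String) : Int × Int :=
  let tf1 := PySem.Dict.counter tokens1
  let tf2 := PySem.Dict.counter tokens2
  let tf_sum1 := tf1.values.sum
  let tf_sum2 := tf2.values.sum
  let min_tf_sum := min tf_sum1 tf_sum2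
  let overlap_tf : Int :=
    tf1.keys.foldl (fun acc key => acc + min (tf1.getD key 0) (tf2.getD key 0)) 0
  (overlap_tf, min_tf_sum)

-- ===== PORT B =====
-- Source B's while loop over two indices, transcribed as recursion on the suffixes the indices point at
def pvMergeOverlap : List String → List String → Int
  | [], _ => 0
  | _ :: _, [] => 0
  | x :: xs, y :: ys =>
      if x = y then pvMergeOverlap xs ys + 1
      else if x < y then pvMergeOverlap xs (y :: ys)
      else pvMergeOverlap (x :: xs) ys
  termination_by a b => a.length + b.length

def get_tokens_overlap_alt (tokens1 : List String) (tokens2 : List String) : Int × Int :=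
  let s1 := PySem.List.sorted tokens1 (fun x => x) false
  let s2 := PySem.List.sorted tokens2 (fun x => x) false
  let n1 : Int := s1.length
  let n2 : Int := s2.length
  (pvMergeOverlap s1 s2, min n1 n2)

-- ===== PRECONDITION & SPEC =====
def Spec_get_tokens_overlap (tokens1 : List String) (tokens2 : List String) (out : Int × Int) : Prop := out = get_tokens_overlap_alt tokens1 tokens2
instance (tokens1 : List String) (tokens2 : List String) (out : Int × Int) : Decidable (Spec_get_tokens_overlap tokens1 tokens2 out) := by unfold Spec_get_tokens_overlap; infer_instance

-- ===== CLAIM (what is proved, stated in full; the proofs are below) =====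
def Claim_equal_get_tokens_overlap : Prop := ∀ (tokens1 : List String) (tokens2 : List String), Dom_get_tokens_overlap tokens1 tokens2 → Spec_get_tokens_overlap tokens1 tokens2 (get_tokens_overlap tokens1 tokens2)

-- ===== LEMMAS AND PROOFS =====

-- cast a sum of Nat-valued terms
theorem pv_sum_map_cast (L : List String) (c : String → Nat) :
    (L.map (fun k => (c k : Int))).sum = ((L.map c).sum : Int) := by
  induction L with
  | nil => simp
  | cons x xs ih => simp [ih]

-- sum of counts over any nodup list with the members of t1 equals length t1
theorem pv_sum_counts (t1 : List String) (L : List String) (hnd : L.Nodup)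
    (hmem : ∀ x, x ∈ L ↔ x ∈ t1) :
    (L.map (fun k => t1.count k)).sum = t1.length := by
  have hperm : L.Perm t1.dedup := by
    apply (List.perm_ext_iff_of_nodup hnd t1.nodup_dedup).2
    intro x; rw [hmem, List.mem_dedup]
  calc (L.map (fun k => t1.count k)).sum
      = (t1.dedup.map (fun k => t1.count k)).sum :=
        List.Perm.sum_eq (hperm.map _)
    _ = t1.length := by
        simpa using t1.sum_map_count_dedup_eq_length

-- sum of min-counts over any nodup list with the members of t1 = card of multiset intersection
theorem pv_sum_min_counts (t1 t2 : List String) (L : List String) (hnd : L.Nodup)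
    (hmem : ∀ x, x ∈ L ↔ x ∈ t1) :
    (L.map (fun k => min (t1.count k) (t2.count k))).sum
      = Multiset.card ((↑t1 : Multiset String) ∩ ↑t2) := by
  set s : Multiset String := (↑t1 : Multiset String) ∩ ↑t2 with hs
  have hcount : ∀ a, s.count a = min (t1.count a) (t2.count a) := by
    intro a; simp [hs]
  have h1 : Multiset.card s = ∑ a ∈ s.toFinset, s.count a :=
    (Multiset.toFinset_sum_count_eq s).symm
  have hsub : s.toFinset ⊆ t1.toFinset := by
    intro a ha
    rw [Multiset.mem_toFinset] at ha
    rw [List.mem_toFinset]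
    exact (Multiset.mem_inter.1 ha).1
  have h2 : ∑ a ∈ s.toFinset, s.count a = ∑ a ∈ t1.toFinset, s.count a := by
    apply Finset.sum_subset hsub
    intro x _ hx
    rw [Multiset.mem_toFinset] at hx
    exact Multiset.count_eq_zero.2 hx
  have h3 : t1.toFinset = L.toFinset := by
    ext x; rw [List.mem_toFinset, List.mem_toFinset, hmem]
  calc (L.map (fun k => min (t1.count k) (t2.count k))).sum
      = ∑ a ∈ L.toFinset, min (t1.count a) (t2.count a) :=
        (List.sum_toFinset _ hnd).symm
    _ = ∑ a ∈ t1.toFinset, s.count a := by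
        rw [h3]; exact Finset.sum_congr rfl (fun a _ => (hcount a).symm)
    _ = Multiset.card s := by rw [← h2, ← h1]

-- the merge of two sorted lists counts the multiset intersection
theorem pv_merge_card (a b : List String)
    (ha : a.Pairwise (· ≤ ·)) (hb : b.Pairwise (· ≤ ·)) :
    pvMergeOverlap a b = (Multiset.card ((↑a : Multiset String) ∩ ↑b) : Int) := by
  induction a, b using pvMergeOverlap.induct with
  | case1 b => simp [pvMergeOverlap]
  | case2 x xs => simp [pvMergeOverlap]
  | case3 xs x ys ih =>
    have hx : x ∈ (↑(x :: ys) : Multiset String) := by simp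
    rw [pvMergeOverlap, if_pos rfl, ih ha.tail hb.tail]
    have hEq : ((↑(x :: xs) : Multiset String) ∩ ↑(x :: ys))
        = x ::ₘ ((↑xs : Multiset String) ∩ ↑ys) := by
      rw [show ((↑(x :: xs) : Multiset String) = x ::ₘ (↑xs : Multiset String)) from rfl,
          Multiset.cons_inter_of_pos _ hx]
      congr 1
      rw [show ((↑(x :: ys) : Multiset String) = x ::ₘ (↑ys : Multiset String)) from rfl,
          Multiset.erase_cons_head]
    rw [hEq, Multiset.card_cons]
    push_cast; ring
  | case4 x xs y ys hne hlt ih =>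
    have hnotmem : x ∉ (↑(y :: ys) : Multiset String) := by
      simp only [Multiset.mem_coe, List.mem_cons]
      rintro (rfl | hz)
      · exact hne rfl
      · have := List.rel_of_pairwise_cons hb hz
        exact absurd (lt_of_lt_of_le hlt this) (lt_irrefl x)
    have hEq : ((↑(x :: xs) : Multiset String) ∩ ↑(y :: ys))
        = (↑xs : Multiset String) ∩ ↑(y :: ys) := by
      rw [show ((↑(x :: xs) : Multiset String) = x ::ₘ (↑xs : Multiset String)) from rfl,
          Multiset.cons_inter_of_neg _ hnotmem]
    rw [pvMergeOverlap, if_neg hne, if_pos hlt, ih ha.tail hb, hEq]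
  | case5 x xs y ys hne hnlt ih =>
    have hylt : y < x := by
      rcases lt_trichotomy x y with h | h | h
      · exact absurd h hnlt
      · exact absurd h hne
      · exact h
    have hnotmem : y ∉ (↑(x :: xs) : Multiset String) := by
      simp only [Multiset.mem_coe, List.mem_cons]
      rintro (rfl | hz)
      · exact lt_irrefl y hylt
      · have := List.rel_of_pairwise_cons ha hz
        exact absurd (lt_of_lt_of_le hylt this) (lt_irrefl y)
    have hEq : ((↑(x :: xs) : Multiset String) ∩ ↑(y :: ys))
        = (↑(x :: xs) : Multiset String) ∩ ↑ys := by
      calc ((↑(x :: xs) : Multiset String) ∩ ↑(y :: ys))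
          = (↑(y :: ys) : Multiset String) ∩ ↑(x :: xs) := Multiset.inter_comm _ _
        _ = (↑ys : Multiset String) ∩ ↑(x :: xs) := by
            rw [show ((↑(y :: ys) : Multiset String) = y ::ₘ (↑ys : Multiset String)) from rfl,
                Multiset.cons_inter_of_neg _ hnotmem]
        _ = (↑(x :: xs) : Multiset String) ∩ ↑ys := Multiset.inter_comm _ _
    rw [pvMergeOverlap, if_neg hne, if_neg hnlt, ih ha hb.tail, hEq]

-- ===== VERDICT (by name: the statement is the Claim_ definition above) =====
theorem get_tokens_overlap_spec : Claim_equal_get_tokens_overlap := by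
  intro t1 t2 _
  unfold Spec_get_tokens_overlap get_tokens_overlap get_tokens_overlap_alt
  simp only []
  set s1 := PySem.List.sorted t1 (fun x => x) false with hs1
  set s2 := PySem.List.sorted t2 (fun x => x) false with hs2
  have hperm1 : s1.Perm t1 := PySem.List.sorted_perm ..
  have hperm2 : s2.Perm t2 := PySem.List.sorted_perm ..
  have hL := PySem.Dict.keys_counter (xs := t1)
  refine Prod.ext ?_ ?_
  · -- overlap components
    show (PySem.Dict.counter t1).keys.foldl
        (fun acc key => acc + min ((PySem.Dict.counter t1).getD key 0) ((PySem.Dict.counter t2).getD key 0)) 0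
      = pvMergeOverlap s1 s2
    rw [PySem.List.foldl_add]
    have hgetD : ∀ k, min ((PySem.Dict.counter t1).getD k 0) ((PySem.Dict.counter t2).getD k 0)
        = ((min (t1.count k) (t2.count k) : Nat) : Int) := by
      intro k
      rw [PySem.Dict.getD_counter, PySem.Dict.getD_counter]
      exact (Nat.cast_min ..).symm
    rw [hL]
    have hmapeq : (PySem.Set.ofList t1).map
          (fun key => min ((PySem.Dict.counter t1).getD key 0) ((PySem.Dict.counter t2).getD key 0))
        = (PySem.Set.ofList t1).map (fun k => ((min (t1.count k) (t2.count k) : Nat) : Int)) :=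
      List.map_congr_left (fun k _ => hgetD k)
    rw [hmapeq, pv_sum_map_cast,
        pv_sum_min_counts t1 t2 _ (PySem.Set.nodup_ofList t1) (fun x => PySem.Set.mem_ofList _ _),
        pv_merge_card s1 s2 (PySem.List.sorted_pairwise ..) (PySem.List.sorted_pairwise ..)]
    rw [show ((↑s1 : Multiset String) = (↑t1 : Multiset String)) from Quot.sound hperm1,
        show ((↑s2 : Multiset String) = (↑t2 : Multiset String)) from Quot.sound hperm2]
    ring
  · -- min_tf_sum components
    show min (PySem.Dict.counter t1).values.sum (PySem.Dict.counter t2).values.sum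
        = min (s1.length : Int) (s2.length : Int)
    have hv : ∀ t : List String, (PySem.Dict.counter t).values.sum = (t.length : Int) := by
      intro t
      have : (PySem.Dict.counter t).values
          = (PySem.Set.ofList t).map (fun k => ((t.count k : Nat) : Int)) := by
        show ((PySem.Dict.counter t).items).map (·.2) = _
        rw [PySem.Dict.items_counter]
        simp [List.map_map, Function.comp]
      rw [this, pv_sum_map_cast,
          pv_sum_counts t _ (PySem.Set.nodup_ofList t) (fun x => PySem.Set.mem_ofList _ _)]
    rw [hv t1, hv t2, hperm1.length_eq, hperm2.length_eq]
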